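-- pv_equiv track=rewrite | github.com/regimeiq/osint-threat-monitor | scripts/generate_evaluation_memo.py | _to_binary_confusion
-- ===== SOURCE A (Python) =====
-- ACTIONABLE_SEVERITIES = {"high", "critical"}
--
-- def _to_binary_confusion(cases, pred_key: str):
--     tp = fp = tn = fn = 0
--     for case in cases:
--         actual_positive = case["expected_severity"] in ACTIONABLE_SEVERITIES
--         predicted_positive = case[pred_key] in ACTIONABLE_SEVERITIES
--         if predicted_positive and actual_positive:
--             tp += 1
--         elif predicted_positive and not actual_positive:
--             fp += 1
--         elif (not predicted_positive) and actual_positive: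
--             fn += 1
--         else:
--             tn += 1
--     return {"tp": tp, "fp": fp, "tn": tn, "fn": fn}
-- ===== SOURCE B (Python) =====
-- ACTIONABLE_SEVERITIES = {"high", "critical"}
--
-- def _to_binary_confusion(cases, pred_key: str):
--     flags = [(case["expected_severity"] in ACTIONABLE_SEVERITIES,
--               case[pred_key] in ACTIONABLE_SEVERITIES) for case in cases]
--     tp = sum(1 for a, p in flags if a and p)
--     actual = sum(1 for a, _ in flags if a)
--     pred = sum(1 for _, p in flags if p)
--     return {"tp": tp, "fp": pred - tp,
--             "tn": len(cases) - actual - pred + tp, "fn": actual - tp}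
-- ===== Notes on version B (the rewrite author's own statement) =====
-- stated objective: alternative
-- what changed: Instead of classifying each case into one of four cells with an if/elif chain, B counts only the true positives and the two marginals (actual positives, predicted positives) and derives fp, fn, tn by subtraction from the totals.
import Mathlib
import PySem

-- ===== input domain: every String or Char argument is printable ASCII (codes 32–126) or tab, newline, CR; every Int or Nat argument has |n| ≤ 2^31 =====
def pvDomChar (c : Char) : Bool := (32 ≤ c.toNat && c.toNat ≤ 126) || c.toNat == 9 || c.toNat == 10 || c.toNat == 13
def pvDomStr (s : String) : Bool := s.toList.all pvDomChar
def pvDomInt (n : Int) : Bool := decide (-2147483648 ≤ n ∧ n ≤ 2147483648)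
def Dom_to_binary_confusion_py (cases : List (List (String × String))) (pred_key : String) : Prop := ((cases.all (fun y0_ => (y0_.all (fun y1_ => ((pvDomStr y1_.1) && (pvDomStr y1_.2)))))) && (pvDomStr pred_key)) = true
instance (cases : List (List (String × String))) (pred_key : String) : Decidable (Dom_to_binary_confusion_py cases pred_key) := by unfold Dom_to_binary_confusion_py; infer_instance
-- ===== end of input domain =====

-- B counts only tp and the two marginals (actual positives, predicted positives) and derives
-- fp, fn, tn by subtraction from the totals; alternative decomposition, same cost.
-- Equivalence is about the return value; neither version mutates its arguments.

-- ===== PORT A =====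
-- ACTIONABLE_SEVERITIES = {"high", "critical"}  (a module-level set constant)
def pvActionable : List String := ["high", "critical"]

-- loop body of A (the four-way if/elif chain over the four counters)
-- case["expected_severity"] / case[pred_key]: first-match assoc lookup; the key is
-- present under Pre_ (Python raises KeyError otherwise), so the .getD "" default is never read there
def pvStepA (pred_key : String) (st : Int × Int × Int × Int) (case_ : List (String × String)) : Int × Int × Int × Int :=
  let (tp, fp, tn, fn) := st
  let actual_positive := pvActionable.contains ((List.lookup "expected_severity" case_).getD "")
  let predicted_positive := pvActionable.contains ((List.lookup pred_key case_).getD "")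
  if predicted_positive && actual_positive then (tp + 1, fp, tn, fn)
  else if predicted_positive && !actual_positive then (tp, fp + 1, tn, fn)
  else if !predicted_positive && actual_positive then (tp, fp, tn, fn + 1)
  else (tp, fp, tn + 1, fn)

def to_binary_confusion_py (cases : List (List (String × String))) (pred_key : String) : List (String × Int) :=
  let st := cases.foldl (pvStepA pred_key) (0, 0, 0, 0)
  [("tp", st.1), ("fp", st.2.1), ("tn", st.2.2.1), ("fn", st.2.2.2)]

-- ===== PORT B =====
-- the (actual_positive, predicted_positive) flag pair of a case
def pvKeyOf (pred_key : String) (case_ : List (String × String)) : Bool × Bool :=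
  (pvActionable.contains ((List.lookup "expected_severity" case_).getD ""),
   pvActionable.contains ((List.lookup pred_key case_).getD ""))

-- sum(1 for … if cond): fold adding 1 where the flag holds
def pvCountTrue (l : List Bool) : Int := l.foldl (fun s b => s + (if b then 1 else 0)) 0

def to_binary_confusion_py_alt (cases : List (List (String × String))) (pred_key : String) : List (String × Int) :=
  let flags := cases.map (pvKeyOf pred_key)
  let tp := pvCountTrue (flags.map (fun k => k.1 && k.2))
  let actual := pvCountTrue (flags.map Prod.fst)
  let pred := pvCountTrue (flags.map Prod.snd)
  [("tp", tp), ("fp", pred - tp),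
   ("tn", (cases.length : Int) - actual - pred + tp), ("fn", actual - tp)]

-- ===== PRECONDITION & SPEC =====
-- Pre_ excludes exactly the inputs on which Python A raises KeyError: some case lacking
-- "expected_severity" or lacking pred_key.
def Pre_to_binary_confusion_py (cases : List (List (String × String))) (pred_key : String) : Prop :=
  ∀ case_ ∈ cases, (List.lookup "expected_severity" case_).isSome = true ∧ (List.lookup pred_key case_).isSome = true
instance (cases : List (List (String × String))) (pred_key : String) : Decidable (Pre_to_binary_confusion_py cases pred_key) := by unfold Pre_to_binary_confusion_py; infer_instance

def pvWitness_to_binary_confusion_py : (List (List (String × String))) × String :=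
  ([[("expected_severity", "high"), ("model", "low")], [("expected_severity", "low"), ("model", "high")]], "model")

def Spec_to_binary_confusion_py (cases : List (List (String × String))) (pred_key : String) (out : List (String × Int)) : Prop := out = to_binary_confusion_py_alt cases pred_key
instance (cases : List (List (String × String))) (pred_key : String) (out : List (String × Int)) : Decidable (Spec_to_binary_confusion_py cases pred_key out) := by unfold Spec_to_binary_confusion_py; infer_instance

-- ===== CLAIM (what is proved, stated in full; the proofs are below) =====
def Claim_equal_to_binary_confusion_py : Prop := ∀ (cases : List (List (String × String))) (pred_key : String), Dom_to_binary_confusion_py cases pred_key → Pre_to_binary_confusion_py cases pred_key → Spec_to_binary_confusion_py cases pred_key (to_binary_confusion_py cases pred_key)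

-- ===== LEMMAS AND PROOFS =====

lemma pvCountTrue_acc (l : List Bool) (s : Int) :
    l.foldl (fun s b => s + (if b then 1 else 0)) s = s + pvCountTrue l := by
  induction l generalizing s with
  | nil => simp [pvCountTrue]
  | cons b bs ih =>
    rw [List.foldl_cons, ih]
    conv_rhs => rw [pvCountTrue, List.foldl_cons, ih]
    ring

lemma pvCountTrue_cons (b : Bool) (l : List Bool) :
    pvCountTrue (b :: l) = (if b then 1 else 0) + pvCountTrue l := by
  conv_lhs => rw [pvCountTrue, List.foldl_cons]
  rw [pvCountTrue_acc]
  ring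

-- A's step, re-expressed through the flag pair of the case.
lemma pv_stepA_eq (pred_key : String) (tp fp tn fn : Int) (c : List (String × String)) :
    pvStepA pred_key (tp, fp, tn, fn) c
      = (tp + (if pvKeyOf pred_key c = (true, true) then 1 else 0),
         fp + (if pvKeyOf pred_key c = (false, true) then 1 else 0),
         tn + (if pvKeyOf pred_key c = (false, false) then 1 else 0),
         fn + (if pvKeyOf pred_key c = (true, false) then 1 else 0)) := by
  unfold pvStepA pvKeyOf
  cases ha : pvActionable.contains ((List.lookup "expected_severity" c).getD "") <;>
    cases hp : pvActionable.contains ((List.lookup pred_key c).getD "") <;> simp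

-- A's loop, expressed as B's three boolean counts plus the length.
lemma pv_a_fold (pred_key : String) (cases : List (List (String × String)))
    (tp fp tn fn : Int) :
    cases.foldl (pvStepA pred_key) (tp, fp, tn, fn)
    = (tp + pvCountTrue ((cases.map (pvKeyOf pred_key)).map (fun k => k.1 && k.2)),
       fp + (pvCountTrue ((cases.map (pvKeyOf pred_key)).map Prod.snd)
             - pvCountTrue ((cases.map (pvKeyOf pred_key)).map (fun k => k.1 && k.2))),
       tn + ((cases.length : Int)
             - pvCountTrue ((cases.map (pvKeyOf pred_key)).map Prod.fst)
             - pvCountTrue ((cases.map (pvKeyOf pred_key)).map Prod.snd)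
             + pvCountTrue ((cases.map (pvKeyOf pred_key)).map (fun k => k.1 && k.2))),
       fn + (pvCountTrue ((cases.map (pvKeyOf pred_key)).map Prod.fst)
             - pvCountTrue ((cases.map (pvKeyOf pred_key)).map (fun k => k.1 && k.2)))) := by
  induction cases generalizing tp fp tn fn with
  | nil => simp [pvCountTrue]
  | cons c cs ih =>
    rw [List.foldl_cons, pv_stepA_eq, ih]
    rcases hk : pvKeyOf pred_key c with ⟨a, p⟩
    simp only [List.map_cons, hk, pvCountTrue_cons, List.length_cons, Nat.cast_add, Nat.cast_one]
    cases a <;> cases p <;>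
      refine Prod.ext ?_ (Prod.ext ?_ (Prod.ext ?_ ?_)) <;> simp <;> ring

-- ===== VERDICT (by name: the statement is the Claim_ definition above) =====
theorem to_binary_confusion_py_spec : Claim_equal_to_binary_confusion_py := by
  intro cases pred_key _ _
  unfold Spec_to_binary_confusion_py to_binary_confusion_py to_binary_confusion_py_alt
  simp only [pv_a_fold]
  norm_num
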